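-- pv_equiv track=rewrite | github.com/adnan34k/Python-Practicals | PR8/decimalSubstraction.py | subtract_numstrings
-- ===== SOURCE A (Python) =====
-- def subtract_numstrings(num1,num2):
--     if len(num2)>len(num1)or(len(num1)==len(num2) and num2>num1):
--         num1,num2 = num2,num1
--     num1 =num1[::-1]
--     num2 =num2[::-1]
--     result =[]
--     borrow =0
--     for i in range(len(num1)):
--         digit1 = int(num1[i])
--         digit2 = int(num2[i]) if i<len(num2) else 0
--         sub =digit1-digit2-borrow
--         if sub<0:
--             sub +=10
--             borrow=1
--         else:
--             borrow=0
--         result.append(str(sub))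
--     while len(result) > 1 and result[-1]=='0':
--         result.pop()
--     return ''.join(result[::-1])
-- ===== SOURCE B (Python) =====
-- def subtract_numstrings(num1, num2):
--     # Same ordering rule as the original; then closed-form arithmetic instead of a borrow loop.
--     if len(num2) > len(num1) or (len(num1) == len(num2) and num2 > num1):
--         num1, num2 = num2, num1
--     if not num1:
--         return ""
--     a = 0
--     for c in num1:
--         a = 10 * a + int(c)
--     b = 0
--     for c in num2:
--         b = 10 * b + int(c)
--     d = (a - b) % 10 ** len(num1)
--     out = ""
--     while d > 0:
--         out = chr(48 + d % 10) + out
--         d //= 10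
--     return out if out else "0"
-- ===== Notes on version B (the rewrite author's own statement) =====
-- stated objective: alternative
-- what changed: A's per-digit borrow-subtraction loop plus trailing-zero stripping is replaced by closed-form integer arithmetic: after A's unchanged length/lexicographic ordering step, B computes d = (int(num1) - int(num2)) mod 10^len(num1) with two Horner passes and renders d back to decimal, which reproduces both the ten's-complement wrap of the ignored final borrow and the leading-zero stripping.
import Mathlib
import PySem

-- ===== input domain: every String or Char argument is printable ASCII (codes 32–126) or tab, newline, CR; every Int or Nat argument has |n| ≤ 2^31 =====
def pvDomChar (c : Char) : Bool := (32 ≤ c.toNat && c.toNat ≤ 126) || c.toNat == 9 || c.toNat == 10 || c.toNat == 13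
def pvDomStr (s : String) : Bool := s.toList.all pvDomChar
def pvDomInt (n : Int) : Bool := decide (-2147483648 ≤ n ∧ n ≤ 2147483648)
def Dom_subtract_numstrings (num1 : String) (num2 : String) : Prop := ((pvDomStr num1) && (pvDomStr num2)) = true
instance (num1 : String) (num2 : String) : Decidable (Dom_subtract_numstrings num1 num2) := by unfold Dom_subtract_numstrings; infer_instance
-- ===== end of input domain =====

-- B replaces A's digit-by-digit borrow loop by closed-form integer arithmetic: the same length/lex
-- ordering step, then d = (value(num1) - value(num2)) mod 10^len(num1), rendered back to decimal.

-- ===== PORT A =====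
-- int(s) applied to the single-character strings num1[i] / num2[i]; exact on Pre_ (digit characters)
def pvDigitInt (c : Char) : Int := (c.toNat : Int) - 48

-- 'for i in range(len(num1)): …' over the two reversed strings, state (result, borrow); the index
-- into num2 advances in step with the one into num1, so 'num2[i] if i < len(num2) else 0' is the
-- head of the not-yet-consumed rest of num2 (ported by hand, exact).
def pvLoopA : List Char → List Char → Int → List (List Char) → List (List Char) × Int
  | [], _, borrow, result => (result, borrow)
  | c :: t1, r2, borrow, result =>
    let digit1 := pvDigitInt c
    let digit2 := match r2 with
      | [] => 0
      | d :: _ => pvDigitInt d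
    let sub := digit1 - digit2 - borrow
    let (sub, borrow) := if sub < 0 then (sub + 10, (1 : Int)) else (sub, 0)
    pvLoopA t1 r2.tail borrow (result ++ [PySem.Int.toChars sub])

-- while len(result) > 1 and result[-1] == '0': result.pop()
def pvStripA (result : List (List Char)) : List (List Char) :=
  if 1 < result.length ∧ result.getLast? = some ['0'] then pvStripA result.dropLast else result
termination_by result.length
decreasing_by simp only [List.length_dropLast]; omega

-- A's body after the swap, on the two character lists (num1[::-1] is reversal,
-- PySem.List.slice?_none_none_neg_one; ''.join(result[::-1]) is PySem.Chars.join)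
def pvSubA (n1 n2 : List Char) : String :=
  let r1 := n1.reverse
  let r2 := n2.reverse
  let res := pvLoopA r1 r2 0 []
  String.ofList (PySem.Chars.join [] (pvStripA res.1).reverse)

def subtract_numstrings (num1 : String) (num2 : String) : String :=
  let p :=
    if num2.toList.length > num1.toList.length ∨
        (num1.toList.length = num2.toList.length ∧ num1.toList < num2.toList) then
      (num2.toList, num1.toList)
    else (num1.toList, num2.toList)
  pvSubA p.1 p.2

-- ===== PORT B =====
-- a = 10*a + int(c) over the string (int(c) ported as pvDigitInt, exact on Pre_)
def pvHorner (cs : List Char) : Int := cs.foldl (fun a c => 10 * a + pvDigitInt c) 0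

-- while d > 0: out = chr(48 + d % 10) + out; d //= 10
def pvRender (d : Int) (out : List Char) : List Char :=
  if 0 < d then
    pvRender (PySem.Int.floordiv d 10) (Char.ofNat (48 + PySem.Int.mod d 10).toNat :: out)
  else out
termination_by d.toNat
decreasing_by
  rename_i h
  rw [PySem.Int.floordiv_eq_ediv_of_pos (by omega)]
  omega

-- B's body after the swap, on the two character lists
def pvSubB (n1 n2 : List Char) : String :=
  if n1 = [] then ""
  else
    let a := pvHorner n1
    let b := pvHorner n2
    let d := PySem.Int.mod (a - b) (10 ^ n1.length)
    let out := pvRender d []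
    if out = [] then "0" else String.ofList out

def subtract_numstrings_alt (num1 : String) (num2 : String) : String :=
  let p :=
    if num2.toList.length > num1.toList.length ∨
        (num1.toList.length = num2.toList.length ∧ num1.toList < num2.toList) then
      (num2.toList, num1.toList)
    else (num1.toList, num2.toList)
  pvSubB p.1 p.2

-- ===== PRECONDITION & SPEC =====
-- Pre_: both strings consist of ASCII digits only — exactly where A's int(num1[i]) / int(num2[i])
-- return instead of raising ValueError.
def pvIsDigB (c : Char) : Bool := 48 ≤ c.toNat && c.toNat ≤ 57
def Pre_subtract_numstrings (num1 : String) (num2 : String) : Prop :=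
  num1.toList.all pvIsDigB = true ∧ num2.toList.all pvIsDigB = true
instance (num1 : String) (num2 : String) : Decidable (Pre_subtract_numstrings num1 num2) := by
  unfold Pre_subtract_numstrings; infer_instance

def pvWitness_subtract_numstrings : String × String := ("73", "208")

def Spec_subtract_numstrings (num1 : String) (num2 : String) (out : String) : Prop := out = subtract_numstrings_alt num1 num2
instance (num1 : String) (num2 : String) (out : String) : Decidable (Spec_subtract_numstrings num1 num2 out) := by unfold Spec_subtract_numstrings; infer_instance

-- ===== CLAIM (what is proved, stated in full; the proofs are below) =====
def Claim_equal_subtract_numstrings : Prop := ∀ (num1 : String) (num2 : String), Dom_subtract_numstrings num1 num2 → Pre_subtract_numstrings num1 num2 → Spec_subtract_numstrings num1 num2 (subtract_numstrings num1 num2)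

-- ===== LEMMAS AND PROOFS =====

-- digit value of an ASCII digit character
def pvDV (c : Char) : Nat := c.toNat - 48

-- the character rendering a digit
def pvChr (d : Nat) : Char := Char.ofNat (48 + d)

-- all characters are ASCII digits
def pvIsDig (cs : List Char) : Prop := ∀ c ∈ cs, 48 ≤ c.toNat ∧ c.toNat ≤ 57

lemma pvOfDigits_cons_int (hd : Nat) (tl : List Nat) :
    (Nat.ofDigits 10 (hd :: tl) : Int) = hd + 10 * (Nat.ofDigits 10 tl : Int) := by
  exact_mod_cast congrArg (Nat.cast (R := Int)) (Nat.ofDigits_cons (b := 10) (hd := hd) (tl := tl))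

lemma pvHorner_aux (cs : List Char) (a0 : Int) (h : pvIsDig cs) :
    cs.foldl (fun a c => 10 * a + pvDigitInt c) a0
      = a0 * 10 ^ cs.length + (Nat.ofDigits 10 ((cs.map pvDV).reverse) : Int) := by
  induction cs generalizing a0 with
  | nil => simp [Nat.ofDigits]
  | cons c t ih =>
    have hc := h c (by simp)
    have ht : pvIsDig t := fun x hx => h x (by simp [hx])
    have hdv : ((pvDV c : Nat) : Int) = pvDigitInt c := by
      simp only [pvDV, pvDigitInt]; omega
    simp only [List.foldl_cons, List.map_cons, List.reverse_cons, ih _ ht]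
    rw [show (Nat.ofDigits 10 ((t.map pvDV).reverse ++ [pvDV c]) : Int)
          = (Nat.ofDigits 10 (t.map pvDV).reverse : Int)
              + 10 ^ (t.map pvDV).reverse.length * (pvDV c : Nat) from by
      exact_mod_cast congrArg (Nat.cast (R := Int)) (Nat.ofDigits_append (b := 10))]
    simp only [List.length_cons, List.length_reverse, List.length_map, hdv]
    ring

lemma pvLoopA_spec (r1 : List Char) : ∀ (r2 : List Char) (b : Int) (acc : List (List Char)),
    pvIsDig r1 → pvIsDig r2 → r2.length ≤ r1.length → (b = 0 ∨ b = 1) →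
    ∃ ds : List Nat, ∃ bout : Int,
      pvLoopA r1 r2 b acc = (acc ++ ds.map (fun d : Nat => PySem.Int.toChars (d : Int)), bout) ∧
      ds.length = r1.length ∧ (∀ d ∈ ds, d < 10) ∧ (bout = 0 ∨ bout = 1) ∧
      (Nat.ofDigits 10 ds : Int) =
        (Nat.ofDigits 10 (r1.map pvDV) : Int) - (Nat.ofDigits 10 (r2.map pvDV) : Int) - b
          + bout * 10 ^ r1.length := by
  induction r1 with
  | nil =>
    intro r2 b acc h1 h2 hlen hb
    simp only [List.length_nil, Nat.le_zero, List.length_eq_zero_iff] at hlen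
    subst hlen
    exact ⟨[], b, by simp [pvLoopA], rfl, by simp, hb, by simp [Nat.ofDigits]⟩
  | cons c t1 ih =>
    intro r2 b acc h1 h2 hlen hb
    have hc := h1 c (by simp)
    have ht1 : pvIsDig t1 := fun x hx => h1 x (by simp [hx])
    have hdc : ((pvDV c : Nat) : Int) = pvDigitInt c := by simp [pvDV, pvDigitInt]; omega
    obtain ⟨d2, t2l, hd2, ht2, hlen2, hunf, hval2⟩ :
        ∃ (d2 : Int) (t2l : List Char), (0 ≤ d2 ∧ d2 ≤ 9) ∧ pvIsDig t2l ∧ t2l.length ≤ t1.length ∧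
          (pvLoopA (c :: t1) r2 b acc =
            (let sub := pvDigitInt c - d2 - b
             let p := if sub < 0 then (sub + 10, (1 : Int)) else (sub, 0)
             pvLoopA t1 t2l p.2 (acc ++ [PySem.Int.toChars p.1]))) ∧
          (Nat.ofDigits 10 (r2.map pvDV) : Int) = d2 + 10 * (Nat.ofDigits 10 (t2l.map pvDV) : Int) := by
      cases r2 with
      | nil =>
        exact ⟨0, [], by norm_num, fun x hx => absurd hx (by simp), by simp,
          by simp [pvLoopA], by simp [Nat.ofDigits]⟩
      | cons d t2 =>
        have hd := h2 d (by simp)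
        refine ⟨pvDigitInt d, t2, by simp [pvDigitInt]; omega,
          fun x hx => h2 x (by simp [hx]), by simp at hlen ⊢; omega,
          by simp [pvLoopA], ?_⟩
        rw [List.map_cons, pvOfDigits_cons_int,
          show ((pvDV d : Nat) : Int) = pvDigitInt d from by simp [pvDV, pvDigitInt]; omega]
    rw [hunf]
    by_cases hs : pvDigitInt c - d2 - b < 0
    · simp only [if_pos hs]
      obtain ⟨ds', bout', heq', hlen', hlt', hb', hval'⟩ :=
        ih t2l 1 (acc ++ [PySem.Int.toChars (pvDigitInt c - d2 - b + 10)]) ht1 ht2 hlen2 (Or.inr rfl)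
      have hv0 : (0:Int) ≤ pvDigitInt c - d2 - b + 10 := by simp [pvDigitInt] at *; omega
      have hv9 : pvDigitInt c - d2 - b + 10 < 10 := by omega
      refine ⟨(pvDigitInt c - d2 - b + 10).toNat :: ds', bout', ?_, by simpa using hlen', ?_, hb', ?_⟩
      · rw [heq']
        simp [List.map_cons, Int.toNat_of_nonneg hv0, List.append_assoc]
      · intro d hdm
        rcases List.mem_cons.mp hdm with h | h
        · subst h; omega
        · exact hlt' _ h
      · rw [pvOfDigits_cons_int, List.map_cons, pvOfDigits_cons_int, hval2, hval',
          Int.toNat_of_nonneg hv0, ← hdc]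
        simp only [List.length_cons]
        ring
    · simp only [if_neg hs]
      obtain ⟨ds', bout', heq', hlen', hlt', hb', hval'⟩ :=
        ih t2l 0 (acc ++ [PySem.Int.toChars (pvDigitInt c - d2 - b)]) ht1 ht2 hlen2 (Or.inl rfl)
      have hv0 : (0:Int) ≤ pvDigitInt c - d2 - b := by omega
      have hv9 : pvDigitInt c - d2 - b < 10 := by simp [pvDigitInt] at *; omega
      refine ⟨(pvDigitInt c - d2 - b).toNat :: ds', bout', ?_, by simpa using hlen', ?_, hb', ?_⟩
      · rw [heq']
        simp [List.map_cons, Int.toNat_of_nonneg hv0, List.append_assoc]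
      · intro d hdm
        rcases List.mem_cons.mp hdm with h | h
        · subst h; omega
        · exact hlt' _ h
      · rw [pvOfDigits_cons_int, List.map_cons, pvOfDigits_cons_int, hval2, hval',
          Int.toNat_of_nonneg hv0, ← hdc]
        simp only [List.length_cons]
        ring

lemma pvToChars_digit (d : Nat) (h : d < 10) :
    PySem.Int.toChars (d : Int) = [pvChr d] := by
  interval_cases d <;> rfl

lemma pvToChars_digit_eq_zero_iff (d : Nat) (h : d < 10) :
    PySem.Int.toChars (d : Int) = ['0'] ↔ d = 0 := by
  interval_cases d <;> simp <;> decide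

lemma pvStripA_digits : ∀ (n : Nat) (ds : List Nat), ds.length = n → (∀ d ∈ ds, d < 10) → ds ≠ [] →
    pvStripA (ds.map (fun d : Nat => PySem.Int.toChars (d : Int))) =
      (if Nat.ofDigits 10 ds = 0 then [0] else Nat.digits 10 (Nat.ofDigits 10 ds)).map
        (fun d : Nat => PySem.Int.toChars (d : Int)) := by
  intro n
  induction n using Nat.strong_induction_on with
  | _ n ih =>
  intro ds hn h hne
  rw [pvStripA]
  by_cases hcond : 1 < (ds.map (fun d : Nat => PySem.Int.toChars (d : Int))).length ∧
      (ds.map (fun d : Nat => PySem.Int.toChars (d : Int))).getLast? = some ['0']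
  · obtain ⟨hlen, hlast⟩ := hcond
    rw [if_pos ⟨hlen, hlast⟩]
    have hlen' : 1 < ds.length := by simpa using hlen
    rw [List.getLast?_map] at hlast
    have hgl : ds.getLast? = some (ds.getLast hne) := List.getLast?_eq_getLast hne
    rw [hgl] at hlast
    have hglmem : ds.getLast hne ∈ ds := List.getLast_mem hne
    have hgl0 : ds.getLast hne = 0 :=
      (pvToChars_digit_eq_zero_iff _ (h _ hglmem)).mp (by simpa using hlast)
    have hdecomp : ds.dropLast ++ [0] = ds := by
      rw [← hgl0]; exact List.dropLast_append_getLast hne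
    have hof : Nat.ofDigits 10 ds.dropLast = Nat.ofDigits 10 ds := by
      conv_rhs => rw [← hdecomp]
      rw [Nat.ofDigits_append]
      simp [Nat.ofDigits_singleton]
    have hdll : ds.dropLast.length = ds.length - 1 := List.length_dropLast
    have hdlne : ds.dropLast ≠ [] := by
      intro hc; rw [hc] at hdll; simp at hdll; omega
    rw [← List.map_dropLast]
    rw [ih (n - 1) (by omega) ds.dropLast (by rw [hdll, hn])
      (fun d hd => h d (List.mem_of_mem_dropLast hd)) hdlne]
    rw [hof]
  · rw [if_neg hcond]
    push_neg at hcond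
    rcases Nat.lt_or_ge 1 ds.length with hl | hl
    · -- last digit nonzero
      have hlast := hcond (by simpa using hl)
      rw [List.getLast?_map, List.getLast?_eq_getLast hne] at hlast
      have hglmem : ds.getLast hne ∈ ds := List.getLast_mem hne
      have hgl0 : ds.getLast hne ≠ 0 := by
        intro h0
        exact hlast (by simp [h0]; decide)
      have hdig : Nat.digits 10 (Nat.ofDigits 10 ds) = ds :=
        Nat.digits_ofDigits 10 (by norm_num) ds h (fun _ => hgl0)
      have hof0 : Nat.ofDigits 10 ds ≠ 0 := by
        intro h0
        rw [h0] at hdig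
        simp at hdig
        exact hne hdig
      rw [if_neg hof0, hdig]
    · -- single digit
      have : ds.length = 1 := by
        have := List.length_pos_of_ne_nil hne
        omega
      obtain ⟨d, hd⟩ := List.length_eq_one_iff.mp this
      subst hd
      by_cases hd0 : d = 0
      · subst hd0
        simp [Nat.ofDigits_singleton]
      · rw [if_neg (by simpa [Nat.ofDigits_singleton] using hd0),
            show Nat.ofDigits 10 [d] = d from by simp [Nat.ofDigits_singleton],
            Nat.digits_of_lt 10 d hd0 (h d (by simp))]

lemma pvRender_spec (m : Nat) (out : List Char) :
    pvRender (m : Int) out = (Nat.digits 10 m).reverse.map pvChr ++ out := by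
  induction m using Nat.strong_induction_on generalizing out with
  | _ m ih =>
  rcases Nat.eq_zero_or_pos m with hm | hm
  · subst hm
    rw [pvRender]
    simp
  · rw [pvRender]
    rw [if_pos (by exact_mod_cast hm)]
    rw [show PySem.Int.floordiv (m : Int) 10 = ((m / 10 : Nat) : Int) from by
          exact_mod_cast PySem.Int.floordiv_natCast m 10,
        show PySem.Int.mod (m : Int) 10 = ((m % 10 : Nat) : Int) from by
          exact_mod_cast PySem.Int.mod_natCast m 10]
    rw [ih (m / 10) (Nat.div_lt_self hm (by norm_num))]
    rw [Nat.digits_def' (by norm_num : 1 < 10) hm]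
    simp [List.map_append, pvChr]
    congr 1

lemma pvJoin_singletons (L : List Nat) (hL : ∀ d ∈ L, d < 10) :
    PySem.Chars.join [] ((L.map (fun d : Nat => PySem.Int.toChars (d : Int))).reverse)
      = L.reverse.map pvChr := by
  rw [← List.map_reverse]
  rw [show L.reverse.map (fun d : Nat => PySem.Int.toChars (d : Int))
        = (L.reverse.map pvChr).map (fun c => [c]) from by
    rw [List.map_map]
    exact List.map_congr_left (fun d hd => pvToChars_digit d (hL d (List.mem_reverse.mp hd)))]
  exact PySem.Chars.join_nil_singletons _

lemma pvPre_toIsDig {s : String} (h : s.toList.all pvIsDigB = true) : pvIsDig s.toList :=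
  fun c hc => by
    have := List.all_eq_true.mp h c hc
    simp [pvIsDigB] at this
    omega

lemma pvSub_core (n1 n2 : List Char) (h1 : pvIsDig n1) (h2 : pvIsDig n2)
    (hlen : n2.length ≤ n1.length) : pvSubA n1 n2 = pvSubB n1 n2 := by
  rcases eq_or_ne n1 [] with hn1 | hn1
  · subst hn1
    have hn2 : n2 = [] := by
      simpa using List.length_eq_zero_iff.mp (by simpa using hlen)
    subst hn2
    show String.ofList (PySem.Chars.join [] (pvStripA (pvLoopA [] [] 0 []).1).reverse) = ""
    rw [show (pvLoopA [] [] 0 []).1 = [] from rfl, pvStripA]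
    simp
  · unfold pvSubA pvSubB
    rw [if_neg hn1]
    have hr1 : pvIsDig n1.reverse := fun c hc => h1 c (List.mem_reverse.mp hc)
    have hr2 : pvIsDig n2.reverse := fun c hc => h2 c (List.mem_reverse.mp hc)
    obtain ⟨ds, bout, heq, hlds, hlt, hbout, hval⟩ :=
      pvLoopA_spec n1.reverse n2.reverse 0 [] hr1 hr2 (by simpa using hlen) (Or.inl rfl)
    simp only [heq, List.nil_append]
    -- the numeric values of the two strings
    have hA : pvHorner n1 = (Nat.ofDigits 10 (n1.reverse.map pvDV) : Int) := by
      rw [pvHorner, pvHorner_aux n1 0 h1]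
      simp [List.map_reverse]
    have hB : pvHorner n2 = (Nat.ofDigits 10 (n2.reverse.map pvDV) : Int) := by
      rw [pvHorner, pvHorner_aux n2 0 h2]
      simp [List.map_reverse]
    set M : Nat := Nat.ofDigits 10 ds with hM
    have hcast : (Nat.ofDigits 10 ds : Int) = (M : Int) := by
      rw [hM]
      exact_mod_cast (Nat.coe_ofDigits Int 10 ds).symm
    have hlen1 : ds.length = n1.length := by simpa using hlds
    have hMlt : M < 10 ^ n1.length := by
      rw [hM, ← hlen1]
      exact Nat.ofDigits_lt_base_pow_length (by norm_num) hlt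
    have hBlt : (Nat.ofDigits 10 (n2.reverse.map pvDV) : Int) < 10 ^ n1.length := by
      calc (Nat.ofDigits 10 (n2.reverse.map pvDV) : Int)
          < 10 ^ (n2.reverse.map pvDV).length := by
            exact_mod_cast Nat.ofDigits_lt_base_pow_length (by norm_num)
              (fun x hx => by
                obtain ⟨c, hc, hcx⟩ := List.mem_map.mp hx
                have := hr2 c hc
                simp [pvDV] at hcx
                omega)
        _ ≤ 10 ^ n1.length := by
            apply pow_le_pow_right₀ (by norm_num)
            simpa using hlen
    -- B's modulus equals the loop's digit value
    have hP : (0:Int) < 10 ^ n1.length := by positivity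
    have hd : PySem.Int.mod (pvHorner n1 - pvHorner n2) (10 ^ n1.length) = (M : Int) := by
      rw [PySem.Int.mod_eq_emod_of_pos hP, hA, hB]
      have hsub : (Nat.ofDigits 10 (n1.reverse.map pvDV) : Int)
          - (Nat.ofDigits 10 (n2.reverse.map pvDV) : Int)
          = (M : Int) - bout * 10 ^ n1.length := by
        rw [← hcast]
        simp only [List.length_reverse] at hval
        linarith [hval]
      rw [hsub, Int.sub_mul_emod_self_right]
      apply Int.emod_eq_of_lt (by positivity)
      exact_mod_cast hMlt
    rw [hd]
    have hdsne : ds ≠ [] := by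
      intro hc
      rw [hc] at hlen1
      exact hn1 (List.length_eq_zero_iff.mp hlen1.symm)
    rw [pvStripA_digits ds.length ds rfl hlt hdsne]
    rcases eq_or_ne M 0 with hM0 | hM0
    · rw [if_pos hM0, hM0]
      rw [pvJoin_singletons [0] (by norm_num)]
      rw [show pvRender ((0 : Nat) : Int) [] = [] from by rw [pvRender]; simp]
      simp [pvChr]
    · rw [if_neg hM0]
      have hdig10 : ∀ d ∈ Nat.digits 10 M, d < 10 := fun d hd => Nat.digits_lt_base (by norm_num) hd
      rw [pvJoin_singletons _ hdig10]
      rw [pvRender_spec M []]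
      have hne' : (Nat.digits 10 M).reverse.map pvChr ++ [] ≠ [] := by
        simp [Nat.digits_ne_nil_iff_ne_zero.mpr hM0]
      rw [if_neg hne']
      simp

-- ===== VERDICT (by name: the statement is the Claim_ definition above) =====
theorem subtract_numstrings_spec : Claim_equal_subtract_numstrings := by
  intro num1 num2 _hdom hpre
  unfold Spec_subtract_numstrings subtract_numstrings subtract_numstrings_alt
  have h1 := pvPre_toIsDig hpre.1
  have h2 := pvPre_toIsDig hpre.2
  by_cases hc : num2.toList.length > num1.toList.length ∨
      (num1.toList.length = num2.toList.length ∧ num1.toList < num2.toList)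
  · simp only [if_pos hc]
    exact pvSub_core _ _ h2 h1 (by rcases hc with h | ⟨h, _⟩ <;> omega)
  · simp only [if_neg hc]
    push_neg at hc
    exact pvSub_core _ _ h1 h2 (by omega)
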